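-- pv_equiv track=rewrite | github.com/DaShenZi721/Software-development-experiment | compress/LZW.py | Narrow
-- ===== SOURCE A (Python) =====
-- def Narrow(sOutStr):
--     sOutN = []
--     iTemp = 0
--     BitLeft = 0
--     nowBit = 9  # 当前位宽
--     nowStag = 1 << nowBit  # 当前位宽允许的标记数
--     nowTagCount = 258
--     for cChar in sOutStr:
--         iTemp = iTemp + (cChar << BitLeft)
--         nowTagCount += 1
--         BitLeft += nowBit
--
--         if cChar == 256:
--             nowBit = 9
--             nowStag = 1 << nowBit
--             nowTagCount = 258
--
--         if nowTagCount >= nowStag: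
--             nowBit += 1
--             nowStag = 1 << nowBit
--
--         while BitLeft >= 8:
--             sOutN.append(iTemp & 0xff)
--             iTemp = iTemp >> 8
--             BitLeft -= 8
--     if BitLeft > 0:
--         sOutN.append(iTemp)
--     return sOutN
-- ===== SOURCE B (Python) =====
-- def Narrow(sOutStr):
--     # Same bit-width state machine, but OR/add each code into one big integer
--     # accumulator instead of draining bytes inside the loop; bytes are emitted
--     # in a single separate pass at the end.
--     total = 0
--     totalbits = 0
--     nowBit = 9
--     nowStag = 1 << nowBit
--     nowTagCount = 258
--     for cChar in sOutStr:
--         total += cChar << totalbits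
--         totalbits += nowBit
--         nowTagCount += 1
--         if cChar == 256:
--             nowBit = 9
--             nowStag = 1 << nowBit
--             nowTagCount = 258
--         if nowTagCount >= nowStag:
--             nowBit += 1
--             nowStag = 1 << nowBit
--     sOutN = []
--     for _ in range(totalbits // 8):
--         sOutN.append(total & 0xff)
--         total >>= 8
--     if totalbits % 8 > 0:
--         sOutN.append(total)
--     return sOutN
-- ===== Notes on version B (the rewrite author's own statement) =====
-- stated objective: alternative
-- what changed: Instead of draining completed bytes from a small shift register inside the main loop, B adds each code into one big-integer accumulator at its bit offset and emits all bytes (totalbits//8 of them plus an unmasked partial tail) in a single separate pass after the loop.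
import Mathlib
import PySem

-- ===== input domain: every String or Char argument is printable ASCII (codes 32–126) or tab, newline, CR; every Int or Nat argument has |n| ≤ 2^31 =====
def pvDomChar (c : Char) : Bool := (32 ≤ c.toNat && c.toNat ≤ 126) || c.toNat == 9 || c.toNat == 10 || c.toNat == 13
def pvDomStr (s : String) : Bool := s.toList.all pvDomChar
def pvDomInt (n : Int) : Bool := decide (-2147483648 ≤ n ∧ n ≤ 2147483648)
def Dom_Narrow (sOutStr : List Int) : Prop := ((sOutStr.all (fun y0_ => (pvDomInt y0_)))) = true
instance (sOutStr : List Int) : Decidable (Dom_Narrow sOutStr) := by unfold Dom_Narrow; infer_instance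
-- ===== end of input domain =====

-- B packs the codes into one big integer accumulator with the same bit-width state
-- machine and emits all bytes in a single separate pass afterwards, instead of A's
-- interleaved byte-draining inside the main loop (objective: alternative decomposition).

-- ===== PORT A =====
-- the 'while BitLeft >= 8' drain loop of A; 'iTemp & 0xff' is PySem.Int.band,
-- 'iTemp >> 8' is Lean's '>>> 8' (Python-exact per PYSEM)
def narrowDrain (sOutN : List Int) (iTemp BitLeft : Int) : List Int × Int × Int :=
  if h : 8 ≤ BitLeft then
    narrowDrain (sOutN ++ [PySem.Int.band iTemp 255]) (iTemp >>> (8:Nat)) (BitLeft - 8)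
  else (sOutN, iTemp, BitLeft)
termination_by BitLeft.toNat
decreasing_by omega

-- one iteration of A's for-loop; 'cChar << BitLeft' is '<<< BitLeft.toNat'
-- (exact: BitLeft is provably ≥ 0 at this point); '1 << nowBit' likewise
def narrowStep (st : List Int × Int × Int × Int × Int × Int) (cChar : Int) :
    List Int × Int × Int × Int × Int × Int :=
  match st with
  | (sOutN, iTemp, BitLeft, nowBit, nowStag, nowTagCount) =>
    let iTemp1 := iTemp + (cChar <<< BitLeft.toNat)
    let nowTagCount1 := nowTagCount + 1
    let BitLeft1 := BitLeft + nowBit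
    -- 'if cChar == 256: nowBit = 9; nowStag = 1 << nowBit; nowTagCount = 258'
    let nowBit2 := if cChar = 256 then (9:Int) else nowBit
    let nowStag2 := if cChar = 256 then (1:Int) <<< (9:Nat) else nowStag
    let nowTagCount2 := if cChar = 256 then (258:Int) else nowTagCount1
    -- 'if nowTagCount >= nowStag: nowBit += 1; nowStag = 1 << nowBit'
    let nowBit3 := if nowStag2 ≤ nowTagCount2 then nowBit2 + 1 else nowBit2
    let nowStag3 := if nowStag2 ≤ nowTagCount2 then (1:Int) <<< (nowBit2 + 1).toNat else nowStag2
    match narrowDrain sOutN iTemp1 BitLeft1 with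
    | (sOutN1, iTemp2, BitLeft2) => (sOutN1, iTemp2, BitLeft2, nowBit3, nowStag3, nowTagCount2)

def Narrow (sOutStr : List Int) : List Int :=
  match sOutStr.foldl narrowStep ([], 0, 0, 9, (1:Int) <<< (9:Nat), 258) with
  | (sOutN, iTemp, BitLeft, _, _, _) => if 0 < BitLeft then sOutN ++ [iTemp] else sOutN

-- ===== PORT B =====
-- one iteration of B's for-loop: same state machine, but the code is added into
-- the big accumulator 'total' at offset 'totalbits' (<<< totalbits.toNat is exact:
-- totalbits provably stays ≥ 0)
def narrowPack (st : Int × Int × Int × Int × Int) (cChar : Int) :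
    Int × Int × Int × Int × Int :=
  match st with
  | (total, totalbits, nowBit, nowStag, nowTagCount) =>
    let total1 := total + (cChar <<< totalbits.toNat)
    let totalbits1 := totalbits + nowBit
    let nowTagCount1 := nowTagCount + 1
    let nowBit2 := if cChar = 256 then (9:Int) else nowBit
    let nowStag2 := if cChar = 256 then (1:Int) <<< (9:Nat) else nowStag
    let nowTagCount2 := if cChar = 256 then (258:Int) else nowTagCount1
    let nowBit3 := if nowStag2 ≤ nowTagCount2 then nowBit2 + 1 else nowBit2
    let nowStag3 := if nowStag2 ≤ nowTagCount2 then (1:Int) <<< (nowBit2 + 1).toNat else nowStag2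
    (total1, totalbits1, nowBit3, nowStag3, nowTagCount2)

-- B's emission pass: 'for _ in range(n): append(total & 0xff); total >>= 8'
def narrowEmit (sOutN : List Int) (total : Int) : Nat → List Int × Int
  | 0 => (sOutN, total)
  | n + 1 => narrowEmit (sOutN ++ [PySem.Int.band total 255]) (total >>> (8:Nat)) n

def Narrow_alt (sOutStr : List Int) : List Int :=
  match sOutStr.foldl narrowPack (0, 0, 9, (1:Int) <<< (9:Nat), 258) with
  | (total, totalbits, _, _, _) =>
    -- range(totalbits // 8): totalbits is provably ≥ 0, so .toNat is exact
    match narrowEmit [] total (PySem.Int.floordiv totalbits 8).toNat with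
    | (sOutN, rest) =>
      if 0 < PySem.Int.mod totalbits 8 then sOutN ++ [rest] else sOutN

-- ===== PRECONDITION & SPEC =====
def Spec_Narrow (sOutStr : List Int) (out : List Int) : Prop := out = Narrow_alt sOutStr
instance (sOutStr : List Int) (out : List Int) : Decidable (Spec_Narrow sOutStr out) := by unfold Spec_Narrow; infer_instance

-- ===== CLAIM (what is proved, stated in full; the proofs are below) =====
def Claim_equal_Narrow : Prop := ∀ (sOutStr : List Int), Dom_Narrow sOutStr → Spec_Narrow sOutStr (Narrow sOutStr)

-- ===== LEMMAS AND PROOFS =====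

-- Python-exact facts about the two byte primitives
theorem band255_eq_emod (a : Int) : PySem.Int.band a 255 = a % 256 := by
  rw [PySem.Int.band.eq_1]
  have h255 : ∀ n : Nat, n &&& 255 = n % 256 := by
    intro n
    have h : (255 : Nat) = 2 ^ 8 - 1 := by norm_num
    rw [h, Nat.and_two_pow_sub_one_eq_mod]
  by_cases ha : 0 ≤ a
  · simp only [ha, if_true, show (0:Int) ≤ 255 by norm_num, if_true]
    rw [show Int.toNat 255 = 255 from rfl, h255]
    omega
  · simp only [ha, if_false, show (0:Int) ≤ 255 by norm_num, if_true]
    rw [show Int.toNat 255 = 255 from rfl, Nat.and_comm, h255]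
    omega

theorem shr8_eq_div (a : Int) : a >>> (8:Nat) = a / 256 := by
  rw [Int.shiftRight_eq_div_pow]; norm_num

-- little-endian value of a byte list
def lval : List Int → Int
  | [] => 0
  | b :: r => b + 256 * lval r

theorem lval_append (xs : List Int) (b : Int) :
    lval (xs ++ [b]) = lval xs + b * 2 ^ (8 * xs.length) := by
  induction xs with
  | nil => simp [lval]
  | cons x xs ih =>
      simp only [List.cons_append, lval, ih, List.length_cons]
      ring

-- the coupling invariant between A's loop state and B's loop state
def NInv (a : List Int × Int × Int × Int × Int × Int) (b : Int × Int × Int × Int × Int) : Prop :=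
  match a, b with
  | (sOutN, iTemp, BitLeft, nowBit, nowStag, nowTagCount),
    (total, totalbits, nowBit', nowStag', nowTagCount') =>
    nowBit' = nowBit ∧ nowStag' = nowStag ∧ nowTagCount' = nowTagCount ∧
    0 ≤ BitLeft ∧ BitLeft < 8 ∧ 9 ≤ nowBit ∧
    totalbits = 8 * sOutN.length + BitLeft ∧
    total = lval sOutN + iTemp * 2 ^ (8 * sOutN.length) ∧
    (∀ b ∈ sOutN, 0 ≤ b ∧ b < 256)

theorem drain_spec (sOutN : List Int) (iTemp BitLeft : Int)
    (hOK : ∀ b ∈ sOutN, 0 ≤ b ∧ b < 256) :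
    ∃ out' t' bl',
      narrowDrain sOutN iTemp BitLeft = (out', t', bl') ∧
      bl' < 8 ∧ (0 ≤ BitLeft → 0 ≤ bl') ∧
      8 * (out'.length : Int) + bl' = 8 * sOutN.length + BitLeft ∧
      lval out' + t' * 2 ^ (8 * out'.length) = lval sOutN + iTemp * 2 ^ (8 * sOutN.length) ∧
      (∀ b ∈ out', 0 ≤ b ∧ b < 256) := by
  induction sOutN, iTemp, BitLeft using narrowDrain.induct with
  | case1 sOutN iTemp BitLeft h ih =>
      have hOK' : ∀ b ∈ sOutN ++ [PySem.Int.band iTemp 255], 0 ≤ b ∧ b < 256 := by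
        intro b hb
        rcases List.mem_append.mp hb with hb | hb
        · exact hOK b hb
        · simp only [List.mem_singleton] at hb
          subst hb
          rw [band255_eq_emod]
          omega
      obtain ⟨out', t', bl', heq, h8, hnn, hlen, hval, hok2⟩ := ih hOK'
      refine ⟨out', t', bl', ?_, h8, ?_, ?_, ?_, hok2⟩
      · rw [narrowDrain]; simp [h, heq]
      · intro _; exact hnn (by omega)
      · simp only [List.length_append, List.length_cons, List.length_nil] at hlen
        push_cast at hlen ⊢; omega
      · have hsplit : iTemp % 256 + 256 * (iTemp / 256) = iTemp := by omega
        simp only [List.length_append, List.length_cons, List.length_nil, Nat.zero_add] at hval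
        rw [hval, lval_append, band255_eq_emod, shr8_eq_div,
            show 8 * (sOutN.length + 1) = 8 * sOutN.length + 8 by ring, pow_add]
        linear_combination ((2:Int) ^ (8 * sOutN.length)) * hsplit
  | case2 sOutN iTemp BitLeft h =>
      refine ⟨sOutN, iTemp, BitLeft, ?_, by omega, fun hh => hh, by ring, rfl, hOK⟩
      rw [narrowDrain]; simp [h]

theorem step_inv (a : List Int × Int × Int × Int × Int × Int) (b : Int × Int × Int × Int × Int)
    (c : Int) (h : NInv a b) : NInv (narrowStep a c) (narrowPack b c) := by
  obtain ⟨sOutN, iTemp, BitLeft, nowBit, nowStag, nowTagCount⟩ := a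
  obtain ⟨total, totalbits, nowBit', nowStag', nowTagCount'⟩ := b
  obtain ⟨e1, e2, e3, hbl0, hbl8, hnb9, htb, htot, hok⟩ := h
  subst nowBit'; subst nowStag'; subst nowTagCount'
  have hshift : c <<< totalbits.toNat = (c <<< BitLeft.toNat) * 2 ^ (8 * sOutN.length) := by
    rw [Int.shiftLeft_eq, Int.shiftLeft_eq]
    have hn : totalbits.toNat = BitLeft.toNat + 8 * sOutN.length := by omega
    rw [hn, pow_add]; ring
  simp only [narrowStep, narrowPack]
  obtain ⟨out', t', bl', heq, h8, hnn, hlen, hval, hok2⟩ :=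
    drain_spec sOutN (iTemp + c <<< BitLeft.toNat) (BitLeft + nowBit) hok
  rw [heq]
  dsimp only
  refine ⟨rfl, rfl, rfl, hnn (by omega), h8, ?_, by omega, ?_, hok2⟩
  · split_ifs <;> omega
  · rw [hval, htot, hshift]; ring

theorem fold_inv (xs : List Int) (a : List Int × Int × Int × Int × Int × Int)
    (b : Int × Int × Int × Int × Int) (h : NInv a b) :
    NInv (xs.foldl narrowStep a) (xs.foldl narrowPack b) := by
  induction xs generalizing a b with
  | nil => exact h
  | cons x xs ih => exact ih _ _ (step_inv a b x h)

theorem emit_spec (out : List Int) (acc : List Int) (t r : Int)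
    (hok : ∀ b ∈ out, 0 ≤ b ∧ b < 256)
    (ht : t = lval out + r * 2 ^ (8 * out.length)) :
    narrowEmit acc t out.length = (acc ++ out, r) := by
  induction out generalizing acc t with
  | nil =>
      simp only [List.length_nil, narrowEmit, List.append_nil]
      simp [lval] at ht
      rw [ht]
  | cons b rest ih =>
      simp only [List.length_cons, narrowEmit]
      have hb := hok b (by simp)
      have hk : t = b + 256 * (lval rest + r * 2 ^ (8 * rest.length)) := by
        rw [ht]
        simp only [lval, List.length_cons]
        rw [show 8 * (rest.length + 1) = 8 * rest.length + 8 by ring, pow_add]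
        ring
      have hmod : PySem.Int.band t 255 = b := by
        rw [band255_eq_emod]; omega
      have hdiv : t >>> (8:Nat) = lval rest + r * 2 ^ (8 * rest.length) := by
        rw [shr8_eq_div]; omega
      rw [hmod, hdiv, ih (acc ++ [b]) _ (fun x hx => hok x (List.mem_cons_of_mem _ hx)) rfl]
      simp

-- ===== VERDICT (by name: the statement is the Claim_ definition above) =====
theorem Narrow_spec : Claim_equal_Narrow := by
  intro sOutStr _
  unfold Spec_Narrow Narrow Narrow_alt
  have h0 : NInv (([], 0, 0, 9, (1:Int) <<< (9:Nat), 258) : List Int × Int × Int × Int × Int × Int)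
      ((0, 0, 9, (1:Int) <<< (9:Nat), 258) : Int × Int × Int × Int × Int) := by
    refine ⟨rfl, rfl, rfl, by norm_num, by norm_num, by norm_num, by simp, by simp [lval], by simp⟩
  have hinv := fold_inv sOutStr _ _ h0
  rcases hA : sOutStr.foldl narrowStep ([], 0, 0, 9, (1:Int) <<< (9:Nat), 258) with
    ⟨sOutN, iTemp, BitLeft, nowBit, nowStag, nowTagCount⟩
  rcases hB : sOutStr.foldl narrowPack (0, 0, 9, (1:Int) <<< (9:Nat), 258) with
    ⟨total, totalbits, nb', ns', nt'⟩
  rw [hA, hB] at hinv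
  dsimp only
  obtain ⟨e1, e2, e3, hbl0, hbl8, hnb9, htb, htot, hok⟩ := hinv
  have hfd : (PySem.Int.floordiv totalbits 8).toNat = sOutN.length := by
    rw [PySem.Int.floordiv_eq_ediv_of_pos (by norm_num)]
    omega
  have hmd : PySem.Int.mod totalbits 8 = BitLeft := by
    rw [PySem.Int.mod_eq_emod_of_pos (by norm_num)]
    omega
  rw [hfd, hmd, emit_spec sOutN [] total iTemp hok htot]
  simp
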